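-- pv_equiv track=rewrite | github.com/abhishekjani123/Daily-Coding | A3.py | createOddPalin
-- ===== SOURCE A (Python) =====
-- def createOddPalin(inp):
--   n = inp
--   palin = inp
--   n = n//10
--   while n > 0:
--     palin = palin*10+(n%10)
--     n = n//10
--   return palin;
-- ===== SOURCE B (Python) =====
-- def createOddPalin(inp):
--     # Single/zero-digit and negative inputs: nothing to append, return as is.
--     if inp < 10:
--         return inp
--     # Collect the decimal digits of inp, least significant first.
--     digits = []
--     n = inp
--     while n > 0:
--         digits.append(n % 10)
--         n //= 10
--     # Palindrome digit sequence (most significant first): all digits of inp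
--     # followed by the digits of inp without its last one, reversed.
--     out = 0
--     for d in digits[::-1] + digits[1:]:
--         out = out * 10 + d
--     return out
-- ===== Notes on version B (the rewrite author's own statement) =====
-- stated objective: alternative
-- what changed: B extracts the explicit digit list once, forms the palindrome's full digit sequence by list reversal/slicing, and evaluates it with a single Horner fold from 0, instead of A's in-place accumulator that starts at inp and appends digits of inp//10 one division at a time.
import Mathlib
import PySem

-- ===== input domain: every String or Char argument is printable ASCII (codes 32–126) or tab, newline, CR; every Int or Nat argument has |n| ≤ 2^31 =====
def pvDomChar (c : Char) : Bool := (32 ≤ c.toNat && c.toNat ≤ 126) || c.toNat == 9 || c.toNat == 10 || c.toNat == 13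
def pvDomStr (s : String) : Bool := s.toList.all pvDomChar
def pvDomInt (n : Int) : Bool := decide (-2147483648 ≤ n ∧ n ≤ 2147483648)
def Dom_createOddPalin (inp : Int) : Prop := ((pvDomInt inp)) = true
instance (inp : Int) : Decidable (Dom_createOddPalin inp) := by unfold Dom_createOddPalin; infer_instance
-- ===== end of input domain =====

-- B builds the explicit digit list and evaluates the palindrome's digit sequence with one
-- Horner fold, instead of A's running accumulator; objective: alternative (same cost).


-- ===== PORT A =====
-- A's while loop: 'while n > 0: palin = palin*10 + n%10; n = n//10'
def pvLoopA (n palin : Int) : Int :=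
  if _h : 0 < n then pvLoopA (PySem.Int.floordiv n 10) (palin * 10 + PySem.Int.mod n 10)
  else palin
termination_by n.toNat
decreasing_by
  rw [PySem.Int.floordiv_eq_ediv_of_pos (by omega)]
  omega

def createOddPalin (inp : Int) : Int := pvLoopA (PySem.Int.floordiv inp 10) inp

-- ===== PORT B =====
-- B's digit-collecting loop: 'while n > 0: digits.append(n % 10); n //= 10' (LSB first)
def pvDigitsB (n : Int) : List Int :=
  if _h : 0 < n then PySem.Int.mod n 10 :: pvDigitsB (PySem.Int.floordiv n 10)
  else []
termination_by n.toNat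
decreasing_by
  rw [PySem.Int.floordiv_eq_ediv_of_pos (by omega)]
  omega

def createOddPalin_alt (inp : Int) : Int :=
  if inp < 10 then inp
  else
    let digits := pvDigitsB inp
    -- digits[::-1] + digits[1:]  (slice? is none only for step 0, so getD [] is exact)
    let seq := (PySem.List.slice? digits none none (-1)).getD [] ++
               PySem.List.slice digits (some 1) none
    seq.foldl (fun out d => out * 10 + d) 0

-- ===== PRECONDITION & SPEC =====
def Spec_createOddPalin (inp : Int) (out : Int) : Prop := out = createOddPalin_alt inp
instance (inp : Int) (out : Int) : Decidable (Spec_createOddPalin inp out) := by unfold Spec_createOddPalin; infer_instance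

-- ===== CLAIM (what is proved, stated in full; the proofs are below) =====
def Claim_equal_createOddPalin : Prop := ∀ (inp : Int), Dom_createOddPalin inp → Spec_createOddPalin inp (createOddPalin inp)

-- ===== LEMMAS AND PROOFS =====

-- A's loop is the Horner fold over B's digit list.
theorem pvLoopA_eq_foldl (n acc : Int) :
    pvLoopA n acc = (pvDigitsB n).foldl (fun out d => out * 10 + d) acc := by
  fun_induction pvLoopA n acc with
  | case1 n acc h ih =>
      rw [pvDigitsB]
      simp only [h, dif_pos, List.foldl_cons]
      exact ih
  | case2 n acc h =>
      rw [pvDigitsB]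
      simp [h]

-- Horner evaluation (MSB first) of B's digit list recovers the number (0 for n <= 0).
theorem pvDigitsB_horner (n : Int) :
    (pvDigitsB n).foldr (fun d out => out * 10 + d) 0 = if 0 < n then n else 0 := by
  fun_induction pvDigitsB n with
  | case1 n h ih =>
      rw [List.foldr_cons, ih,
          PySem.Int.floordiv_eq_ediv_of_pos (by norm_num : (0:Int) < 10),
          PySem.Int.mod_eq_emod_of_pos (by norm_num : (0:Int) < 10)]
      split_ifs with h2 <;> omega
  | case2 n h =>
      rw [List.foldr_nil, if_neg h]

theorem createOddPalin_eq (inp : Int) : createOddPalin inp = createOddPalin_alt inp := by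
  by_cases h : inp < 10
  · have hq : PySem.Int.floordiv inp 10 = inp / 10 :=
      PySem.Int.floordiv_eq_ediv_of_pos (by norm_num)
    have hle : ¬ (0 < PySem.Int.floordiv inp 10) := by rw [hq]; omega
    unfold createOddPalin createOddPalin_alt
    rw [pvLoopA, dif_neg hle, if_pos h]
  · have hpos : 0 < inp := by omega
    unfold createOddPalin createOddPalin_alt
    rw [if_neg h]
    simp only [PySem.List.slice?_none_none_neg_one, Option.getD_some,
      PySem.List.slice_from_one, List.foldl_append]
    rw [List.foldl_reverse, pvDigitsB_horner, if_pos hpos]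
    conv_rhs => rw [pvDigitsB, dif_pos hpos]
    rw [List.tail_cons]
    exact pvLoopA_eq_foldl (PySem.Int.floordiv inp 10) inp

-- ===== VERDICT (by name: the statement is the Claim_ definition above) =====
theorem createOddPalin_spec : Claim_equal_createOddPalin := by
  intro inp _
  unfold Spec_createOddPalin
  exact createOddPalin_eq inp
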